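-- pv_equiv track=rewrite | github.com/FJayD89/BlueMen | perfect.py | to_grid
-- ===== SOURCE A (Python) =====
-- from itertools import product
--
-- def to_grid(man: set):
-- 	width = max(p[0] for p in man) + 1
-- 	height = max(p[1] for p in man) + 1
--
-- 	grid = [[' ' for i in range(width)] for j in range(height)]
--
-- 	for (y, x) in product(range(height), range(width)):
-- 		if (x, y) in man:
-- 			grid[y][x] = 'X'
--
-- 	grid = [" ".join(map(str, line)) for line in grid]
-- 	grid = "\n".join(grid)
-- 	return grid
-- ===== SOURCE B (Python) =====
-- def to_grid(man: set):
--     width = max(p[0] for p in man) + 1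
--     height = max(p[1] for p in man) + 1
--
--     # each row is a flat character buffer of width 2*width-1 ('X'/' ' cells
--     # separated by spaces), written by scattering the points themselves
--     rows = [[' '] * (2 * width - 1) for _ in range(height)]
--     for (x, y) in man:
--         if 0 <= x < width and 0 <= y < height:
--             rows[y][2 * x] = 'X'
--
--     return "\n".join("".join(row) for row in rows)
-- ===== Notes on version B (the rewrite author's own statement) =====
-- stated objective: faster
-- what changed: B drops A's full (y,x) sweep with a per-cell set-membership test and the per-row ' '.join: each row is one flat character buffer of width 2*width-1, B writes 'X' at offset 2*x for each in-bounds point, and joins the buffers directly.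
import Mathlib
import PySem

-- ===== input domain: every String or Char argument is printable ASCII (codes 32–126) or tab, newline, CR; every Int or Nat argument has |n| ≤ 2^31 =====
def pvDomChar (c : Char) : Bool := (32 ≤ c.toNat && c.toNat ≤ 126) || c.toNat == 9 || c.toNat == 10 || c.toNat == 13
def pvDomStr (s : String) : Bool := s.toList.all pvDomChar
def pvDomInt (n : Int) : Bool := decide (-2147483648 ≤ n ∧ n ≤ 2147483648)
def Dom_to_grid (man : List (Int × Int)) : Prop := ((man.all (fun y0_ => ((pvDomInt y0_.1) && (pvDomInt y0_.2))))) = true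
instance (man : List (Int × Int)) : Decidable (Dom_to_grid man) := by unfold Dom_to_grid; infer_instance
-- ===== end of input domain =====

-- B replaces A's per-cell sweep (a membership test at every (y,x), then a ' '.join per row) by a
-- scatter into flat stride-2 character buffers, one per row, joined directly (objective: faster
-- by a constant-factor mechanism: one write per point instead of one membership test per cell).

-- ===== PORT A =====
-- grid[y][x] = 'X'  (list set; out-of-range indices are a no-op, as they are never reached in range)
def pvCellSet (g : List (List String)) (x y : Nat) : List (List String) :=
  g.set y ((g.getD y []).set x "X")

def to_grid (man : List (Int × Int)) : String :=
  -- max(...) raises on empty man: Pre_ excludes []; .getD 0 is never reached inside Pre_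
  let width := (PySem.List.max? (man.map Prod.fst) (fun v => v)).getD 0 + 1
  let height := (PySem.List.max? (man.map Prod.snd) (fun v => v)).getD 0 + 1
  let grid0 := (PySem.List.pyRange 0 height).map (fun _ => (PySem.List.pyRange 0 width).map (fun _ => " "))
  -- for (y, x) in product(range(height), range(width)): if (x, y) in man: grid[y][x] = 'X'
  -- (loop indices come from range, hence are ≥ 0, so .toNat is exact)
  let pairs := (PySem.List.pyRange 0 height).flatMap (fun y => (PySem.List.pyRange 0 width).map (fun x => (y, x)))
  let grid := pairs.foldl (fun g yx => if (yx.2, yx.1) ∈ man then pvCellSet g yx.2.toNat yx.1.toNat else g) grid0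
  PySem.Str.join "\n" (grid.map (fun line => PySem.Str.join " " line))

-- ===== PORT B =====
-- rows[y][k] = 'X' on a flat character buffer (k = 2*x; in range by the loop's bounds guard)
def pvPaint (g : List (List Char)) (k y : Nat) : List (List Char) :=
  g.set y ((g.getD y []).set k 'X')

def to_grid_alt (man : List (Int × Int)) : String :=
  let width := (PySem.List.max? (man.map Prod.fst) (fun v => v)).getD 0 + 1
  let height := (PySem.List.max? (man.map Prod.snd) (fun v => v)).getD 0 + 1
  -- rows = [[' '] * (2 * width - 1) for _ in range(height)]  (single characters; cells live at even offsets)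
  let rows0 := List.replicate height.toNat (List.replicate (2 * width - 1).toNat ' ')
  -- for (x, y) in man: if 0 <= x < width and 0 <= y < height: rows[y][2 * x] = 'X'
  let rows := man.foldl
    (fun g p => if 0 ≤ p.1 ∧ p.1 < width ∧ 0 ≤ p.2 ∧ p.2 < height then pvPaint g (2 * p.1.toNat) p.2.toNat else g) rows0
  -- "\n".join("".join(row) for row in rows)
  PySem.Str.join "\n" (rows.map (fun r => String.ofList r))

-- ===== PRECONDITION & SPEC =====
-- Pre_ excludes only the empty list, on which Python's max() raises ValueError (in A and in B alike).
def Pre_to_grid (man : List (Int × Int)) : Prop := man ≠ []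
instance (man : List (Int × Int)) : Decidable (Pre_to_grid man) := by unfold Pre_to_grid; infer_instance
def pvWitness_to_grid : (List (Int × Int)) := [((0 : Int), (0 : Int))]

def Spec_to_grid (man : List (Int × Int)) (out : String) : Prop := out = to_grid_alt man
instance (man : List (Int × Int)) (out : String) : Decidable (Spec_to_grid man out) := by unfold Spec_to_grid; infer_instance

-- ===== CLAIM (what is proved, stated in full; the proofs are below) =====
def Claim_equal_to_grid : Prop := ∀ (man : List (Int × Int)), Dom_to_grid man → Pre_to_grid man → Spec_to_grid man (to_grid man)

-- ===== LEMMAS AND PROOFS =====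

-- generic single write into a grid of α (both ports' writers are instances of it)
def pvCell {α : Type} (v : α) (g : List (List α)) (x y : Nat) : List (List α) :=
  g.set y ((g.getD y []).set x v)

theorem pvCellSet_eq_cell : pvCellSet = pvCell "X" := rfl
theorem pvPaint_eq_cell : pvPaint = pvCell 'X' := rfl

-- read grid[j][i] (out-of-range reads give d)
def pvRead {α : Type} (d : α) (g : List (List α)) (j i : Nat) : α := (g[j]?.getD [])[i]?.getD d

theorem pvCell_length {α : Type} (v : α) (g : List (List α)) (x y : Nat) :
    (pvCell v g x y).length = g.length := by
  simp [pvCell]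

theorem pvCell_row_length {α : Type} (v : α) (g : List (List α)) (x y j : Nat) :
    ((pvCell v g x y)[j]?.getD []).length = (g[j]?.getD []).length := by
  unfold pvCell
  rw [List.getElem?_set]
  by_cases h : y = j
  · subst h
    by_cases hy : y < g.length
    · simp [hy, List.getD_eq_getElem?_getD]
    · simp [hy]
  · rw [if_neg h]

theorem pvCell_read {α : Type} (d v : α) (g : List (List α)) (x y j i : Nat) :
    pvRead d (pvCell v g x y) j i =
      if y = j ∧ x = i ∧ j < g.length ∧ i < (g[j]?.getD []).length then v else pvRead d g j i := by
  unfold pvRead pvCell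
  by_cases hyj : y = j
  · subst hyj
    by_cases hy : y < g.length
    · by_cases hxi : x = i
      · subst hxi
        by_cases hx : x < (g[y]?.getD []).length
        · have hx' : x < g[y].length := by simpa [List.getElem?_eq_getElem hy] using hx
          simp [hy, hx', List.getD_eq_getElem?_getD]
        · have hx' : ¬ x < g[y].length := by simpa [List.getElem?_eq_getElem hy] using hx
          simp [hy, hx', List.getD_eq_getElem?_getD]
      · simp [hy, hxi, List.getD_eq_getElem?_getD]
    · simp [hy]
  · simp [hyj]

theorem pvScatter_length {α A : Type} (v : α) (c : A → Prop) [DecidablePred c] (fx fy : A → Nat)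
    (ps : List A) (g : List (List α)) :
    (ps.foldl (fun g q => if c q then pvCell v g (fx q) (fy q) else g) g).length = g.length := by
  induction ps generalizing g with
  | nil => rfl
  | cons q t ih =>
      simp only [List.foldl_cons]
      rw [ih]
      by_cases h : c q
      · rw [if_pos h, pvCell_length]
      · rw [if_neg h]

theorem pvScatter_row_length {α A : Type} (v : α) (c : A → Prop) [DecidablePred c] (fx fy : A → Nat)
    (ps : List A) (g : List (List α)) (j : Nat) :
    ((ps.foldl (fun g q => if c q then pvCell v g (fx q) (fy q) else g) g)[j]?.getD []).length
      = (g[j]?.getD []).length := by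
  induction ps generalizing g with
  | nil => rfl
  | cons q t ih =>
      simp only [List.foldl_cons]
      rw [ih]
      by_cases h : c q
      · rw [if_pos h, pvCell_row_length]
      · rw [if_neg h]

theorem pvScatter_read {α A : Type} (d v : α) (c : A → Prop) [DecidablePred c] (fx fy : A → Nat)
    (ps : List A) (g : List (List α)) (j i : Nat)
    (hj : j < g.length) (hi : i < (g[j]?.getD []).length) :
    pvRead d (ps.foldl (fun g q => if c q then pvCell v g (fx q) (fy q) else g) g) j i =
      if ∃ q ∈ ps, c q ∧ fx q = i ∧ fy q = j then v else pvRead d g j i := by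
  induction ps generalizing g with
  | nil => simp
  | cons q t ih =>
      simp only [List.foldl_cons]
      by_cases h : c q
      · rw [if_pos h]
        have hj' : j < (pvCell v g (fx q) (fy q)).length := by rw [pvCell_length]; exact hj
        have hi' : i < ((pvCell v g (fx q) (fy q))[j]?.getD []).length := by
          rw [pvCell_row_length]; exact hi
        rw [ih _ hj' hi', pvCell_read]
        by_cases ht : ∃ x ∈ t, c x ∧ fx x = i ∧ fy x = j
        · rw [if_pos ht, if_pos (by rcases ht with ⟨x, hx, hc⟩; exact ⟨x, List.mem_cons_of_mem _ hx, hc⟩)]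
        · rw [if_neg ht]
          by_cases hq : fy q = j ∧ fx q = i
          · rw [if_pos ⟨hq.1, hq.2, hj, hi⟩, if_pos ⟨q, List.mem_cons_self, h, hq.2, hq.1⟩]
          · rw [if_neg (by tauto)]
            rw [if_neg (by
              rintro ⟨x, hx, hc⟩
              rcases List.mem_cons.mp hx with rfl | hx
              · exact hq ⟨hc.2.2, hc.2.1⟩
              · exact ht ⟨x, hx, hc⟩)]
      · rw [if_neg h, ih _ hj hi]
        have hiff : (∃ x ∈ q :: t, c x ∧ fx x = i ∧ fy x = j) ↔ (∃ x ∈ t, c x ∧ fx x = i ∧ fy x = j) := by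
          constructor
          · rintro ⟨x, hx, hc⟩
            rcases List.mem_cons.mp hx with rfl | hx
            · exact absurd hc.1 h
            · exact ⟨x, hx, hc⟩
          · rintro ⟨x, hx, hc⟩
            exact ⟨x, List.mem_cons_of_mem _ hx, hc⟩
        exact (if_congr hiff rfl rfl).symm

-- a scattered grid's row j, as a map over offsets
theorem pvScatter_row {α A : Type} (blank v : α) (c : A → Prop) [DecidablePred c] (fx fy : A → Nat)
    (ps : List A) (g : List (List α)) (j rowlen : Nat)
    (hj : j < g.length) (hrl : (g[j]?.getD []).length = rowlen)
    (hblank : ∀ i, i < rowlen → pvRead blank g j i = blank) :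
    (ps.foldl (fun g q => if c q then pvCell v g (fx q) (fy q) else g) g)[j]?.getD []
      = (List.range rowlen).map (fun i => if ∃ q ∈ ps, c q ∧ fx q = i ∧ fy q = j then v else blank) := by
  apply List.ext_getElem
  · rw [pvScatter_row_length, hrl]
    simp
  · intro i hiL hiR
    have hi : i < rowlen := by simpa using hiR
    have hi' : i < (g[j]?.getD []).length := by omega
    have m := pvScatter_read blank v c fx fy ps g j i hj hi'
    rw [hblank i hi] at m
    unfold pvRead at m
    rw [List.getElem?_eq_getElem hiL, Option.getD_some] at m
    rw [m]
    simp

-- on x < width, y < height cells, A's product-loop hit condition equals B's bounds condition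
theorem pvHit_iff (man : List (Int × Int)) (width height : Int) (j i : Nat) :
    (∃ q ∈ (PySem.List.pyRange 0 height 1).flatMap
        (fun y => (PySem.List.pyRange 0 width 1).map (fun x => (y, x))),
      (q.2, q.1) ∈ man ∧ q.2.toNat = i ∧ q.1.toNat = j)
    ↔ (∃ p ∈ man, (0 ≤ p.1 ∧ p.1 < width ∧ 0 ≤ p.2 ∧ p.2 < height) ∧ p.1.toNat = i ∧ p.2.toNat = j) := by
  constructor
  · rintro ⟨q, hq, hm, hi, hj⟩
    rw [List.mem_flatMap] at hq
    rcases hq with ⟨y, hy, hq⟩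
    rw [List.mem_map] at hq
    rcases hq with ⟨x, hx, rfl⟩
    rw [PySem.List.mem_pyRange_one] at hy hx
    exact ⟨(x, y), hm, ⟨hx.1, hx.2, hy.1, hy.2⟩, hi, hj⟩
  · rintro ⟨p, hp, ⟨h1, h2, h3, h4⟩, hi, hj⟩
    refine ⟨(p.2, p.1), ?_, hp, hi, hj⟩
    rw [List.mem_flatMap]
    exact ⟨p.2, PySem.List.mem_pyRange_one.mpr ⟨h3, h4⟩,
      List.mem_map.mpr ⟨p.1, PySem.List.mem_pyRange_one.mpr ⟨h1, h2⟩, rfl⟩⟩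

-- B's character hit at offset k is a cell hit at column k/2 on even k
theorem pvHitC_iff (man : List (Int × Int)) (width height : Int) (j k : Nat) :
    (∃ p ∈ man, (0 ≤ p.1 ∧ p.1 < width ∧ 0 ≤ p.2 ∧ p.2 < height) ∧ 2 * p.1.toNat = k ∧ p.2.toNat = j)
    ↔ (k % 2 = 0 ∧ ∃ p ∈ man, (0 ≤ p.1 ∧ p.1 < width ∧ 0 ≤ p.2 ∧ p.2 < height) ∧ p.1.toNat = k / 2 ∧ p.2.toNat = j) := by
  constructor
  · rintro ⟨p, hp, hb, hk, hj⟩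
    exact ⟨by omega, p, hp, hb, by omega, hj⟩
  · rintro ⟨hk, p, hp, hb, hx, hj⟩
    exact ⟨p, hp, hb, by omega, hj⟩

theorem pvIntersperse_cons_cons (a b : Char) (t : List Char) :
    List.intersperse ' ' (a :: b :: t) = a :: ' ' :: List.intersperse ' ' (b :: t) := rfl

theorem pvRangeMapCons (f : Nat → Char) (n : Nat) :
    (List.range (n + 1)).map f = f 0 :: (List.range n).map (fun i => f (i + 1)) := by
  rw [List.range_succ_eq_map, List.map_cons, List.map_map]
  rfl

-- ' '.join over single-character cells, on the char-list side, is intersperse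
theorem pvJoinSing (cs : List Char) :
    PySem.Chars.join [' '] (cs.map (fun c => [c])) = List.intersperse ' ' cs := by
  induction cs with
  | nil => simp [PySem.Chars.join_nil]
  | cons a t ih =>
      cases t with
      | nil => simp [PySem.Chars.join_singleton]
      | cons b u =>
          simp only [List.map_cons] at ih ⊢
          rw [PySem.Chars.join_cons_cons, pvIntersperse_cons_cons, ih]
          rfl

-- interspersing w cells with ' ' is the stride-2 buffer of length 2*w-1
theorem pvInterStride (w : Nat) : ∀ (P : Nat → Prop) [DecidablePred P],
    List.intersperse ' ' ((List.range w).map (fun i => if P i then 'X' else ' '))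
      = (List.range (2 * w - 1)).map (fun k => if k % 2 = 0 ∧ P (k / 2) then 'X' else ' ') := by
  induction w with
  | zero => intro P _; simp
  | succ w ih =>
      intro P _
      cases w with
      | zero => simp
      | succ w' =>
          rw [pvRangeMapCons (fun i => if P i then 'X' else ' ') (w' + 1),
            pvRangeMapCons (fun i => if P (i + 1) then 'X' else ' ') w',
            pvIntersperse_cons_cons,
            ← pvRangeMapCons (fun i => if P (i + 1) then 'X' else ' ') w',
            ih (fun i => P (i + 1))]
          have harith : 2 * (w' + 1 + 1) - 1 = (2 * (w' + 1) - 1) + 1 + 1 := by omega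
          rw [harith,
            pvRangeMapCons (fun k => if k % 2 = 0 ∧ P (k / 2) then 'X' else ' ') ((2 * (w' + 1) - 1) + 1),
            pvRangeMapCons (fun i => if (i + 1) % 2 = 0 ∧ P ((i + 1) / 2) then 'X' else ' ') (2 * (w' + 1) - 1)]
          norm_num
          intro k _
          have e1 : (k + 1 + 1) % 2 = k % 2 := by omega
          have e2 : (k + 1 + 1) / 2 = k / 2 + 1 := by omega
          rw [e1, e2]

-- a whole row: ' '.join of the w cells equals the stride-2 char buffer as a String
theorem pvRowStr (w : Nat) (P : Nat → Prop) [DecidablePred P] :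
    PySem.Str.join " " ((List.range w).map (fun i => if P i then "X" else " "))
      = String.ofList ((List.range (2 * w - 1)).map (fun k => if k % 2 = 0 ∧ P (k / 2) then 'X' else ' ')) := by
  have hUnfold : PySem.Str.join " " ((List.range w).map (fun i => if P i then "X" else " "))
      = String.ofList (PySem.Chars.join " ".toList
          (((List.range w).map (fun i => if P i then "X" else " ")).map String.toList)) := rfl
  rw [hUnfold]
  congr 1
  rw [List.map_map]
  have hsp : " ".toList = [' '] := by decide
  have hcomp : (String.toList ∘ fun i => if P i then "X" else " ")
      = ((fun c => [c]) ∘ fun i => if P i then 'X' else ' ') := by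
    funext i
    by_cases h : P i <;> simp [h]
  rw [hsp, hcomp, ← List.map_map, pvJoinSing, pvInterStride]

-- the rendered outputs of the two scattered grids coincide
theorem pvMaps_eq (man : List (Int × Int)) (width height : Int) :
    (((PySem.List.pyRange 0 height 1).flatMap
        (fun y => (PySem.List.pyRange 0 width 1).map (fun x => (y, x)))).foldl
      (fun g yx => if (yx.2, yx.1) ∈ man then pvCell "X" g yx.2.toNat yx.1.toNat else g)
      ((PySem.List.pyRange 0 height 1).map (fun _ => (PySem.List.pyRange 0 width 1).map (fun _ => " ")))).map
        (fun line => PySem.Str.join " " line)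
    = ((man.foldl
        (fun g p => if 0 ≤ p.1 ∧ p.1 < width ∧ 0 ≤ p.2 ∧ p.2 < height then pvCell 'X' g (2 * p.1.toNat) p.2.toNat else g)
        (List.replicate height.toNat (List.replicate (2 * width - 1).toNat ' '))).map
          (fun r => String.ofList r)) := by
  set gA0 := (PySem.List.pyRange 0 height 1).map (fun _ => (PySem.List.pyRange 0 width 1).map (fun _ => " ")) with hgA0
  set gB0 := List.replicate height.toNat (List.replicate (2 * width - 1).toNat ' ') with hgB0
  have hA0len : gA0.length = height.toNat := by
    simp [hgA0, PySem.List.length_pyRange_one]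
  have hB0len : gB0.length = height.toNat := by simp [hgB0]
  have hw2 : (2 * width - 1).toNat = 2 * width.toNat - 1 := by omega
  apply List.ext_getElem
  · rw [List.length_map, List.length_map, pvScatter_length, pvScatter_length, hA0len, hB0len]
  · intro j hL hR
    rw [List.length_map, pvScatter_length, hA0len] at hL
    rw [List.length_map, pvScatter_length, hB0len] at hR
    have hj : j < height.toNat := hL
    rw [List.getElem_map, List.getElem_map]
    have hjA : j < gA0.length := by omega
    have hjB : j < gB0.length := by omega
    have hjA' : j < (((PySem.List.pyRange 0 height 1).flatMap
        (fun y => (PySem.List.pyRange 0 width 1).map (fun x => (y, x)))).foldl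
      (fun g yx => if (yx.2, yx.1) ∈ man then pvCell "X" g yx.2.toNat yx.1.toNat else g) gA0).length := by
      rw [pvScatter_length]; omega
    have hjB' : j < (man.foldl
        (fun g p => if 0 ≤ p.1 ∧ p.1 < width ∧ 0 ≤ p.2 ∧ p.2 < height then pvCell 'X' g (2 * p.1.toNat) p.2.toNat else g) gB0).length := by
      rw [pvScatter_length]; omega
    -- row of A's grid
    have hrowA0 : gA0[j]?.getD [] = (PySem.List.pyRange 0 width 1).map (fun _ => " ") := by
      rw [List.getElem?_eq_getElem hjA]
      simp [hgA0]
    have hrlA : (gA0[j]?.getD []).length = width.toNat := by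
      rw [hrowA0]
      simp [PySem.List.length_pyRange_one]
    have hblankA : ∀ i, i < width.toNat → pvRead " " gA0 j i = " " := by
      intro i hi
      unfold pvRead
      rw [hrowA0]
      rw [List.getElem?_eq_getElem (by simp [PySem.List.length_pyRange_one]; omega)]
      simp
    have hrowA := pvScatter_row " " "X" (fun yx : Int × Int => (yx.2, yx.1) ∈ man)
      (fun yx => yx.2.toNat) (fun yx => yx.1.toNat)
      ((PySem.List.pyRange 0 height 1).flatMap (fun y => (PySem.List.pyRange 0 width 1).map (fun x => (y, x))))
      gA0 j width.toNat hjA hrlA hblankA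
    -- row of B's grid
    have hrowB0 : gB0[j]?.getD [] = List.replicate (2 * width - 1).toNat ' ' := by
      rw [List.getElem?_eq_getElem hjB]
      simp [hgB0]
    have hrlB : (gB0[j]?.getD []).length = 2 * width.toNat - 1 := by
      rw [hrowB0]
      simp [hw2]
    have hblankB : ∀ i, i < 2 * width.toNat - 1 → pvRead ' ' gB0 j i = ' ' := by
      intro i hi
      unfold pvRead
      rw [hrowB0]
      rw [List.getElem?_eq_getElem (by simp; omega)]
      simp
    have hrowB := pvScatter_row ' ' 'X' (fun p : Int × Int => 0 ≤ p.1 ∧ p.1 < width ∧ 0 ≤ p.2 ∧ p.2 < height)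
      (fun p => 2 * p.1.toNat) (fun p => p.2.toNat) man gB0 j (2 * width.toNat - 1) hjB hrlB hblankB
    have hgA : (((PySem.List.pyRange 0 height 1).flatMap
        (fun y => (PySem.List.pyRange 0 width 1).map (fun x => (y, x)))).foldl
      (fun g yx => if (yx.2, yx.1) ∈ man then pvCell "X" g yx.2.toNat yx.1.toNat else g) gA0)[j]
        = (((PySem.List.pyRange 0 height 1).flatMap
        (fun y => (PySem.List.pyRange 0 width 1).map (fun x => (y, x)))).foldl
      (fun g yx => if (yx.2, yx.1) ∈ man then pvCell "X" g yx.2.toNat yx.1.toNat else g) gA0)[j]?.getD [] := by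
      rw [List.getElem?_eq_getElem hjA', Option.getD_some]
    have hgB : (man.foldl
        (fun g p => if 0 ≤ p.1 ∧ p.1 < width ∧ 0 ≤ p.2 ∧ p.2 < height then pvCell 'X' g (2 * p.1.toNat) p.2.toNat else g) gB0)[j]
        = (man.foldl
        (fun g p => if 0 ≤ p.1 ∧ p.1 < width ∧ 0 ≤ p.2 ∧ p.2 < height then pvCell 'X' g (2 * p.1.toNat) p.2.toNat else g) gB0)[j]?.getD [] := by
      rw [List.getElem?_eq_getElem hjB', Option.getD_some]
    rw [hgA, hgB, hrowA, hrowB]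
    -- replace A's hit predicate by the bounds form
    have hmapA : (List.range width.toNat).map
        (fun i => if ∃ q ∈ (PySem.List.pyRange 0 height 1).flatMap
            (fun y => (PySem.List.pyRange 0 width 1).map (fun x => (y, x))),
          (q.2, q.1) ∈ man ∧ q.2.toNat = i ∧ q.1.toNat = j then "X" else " ")
        = (List.range width.toNat).map
        (fun i => if ∃ p ∈ man, (0 ≤ p.1 ∧ p.1 < width ∧ 0 ≤ p.2 ∧ p.2 < height) ∧ p.1.toNat = i ∧ p.2.toNat = j then "X" else " ") := by
      apply List.map_congr_left
      intro i _
      exact if_congr (pvHit_iff man width height j i) rfl rfl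
    have hmapB : (List.range (2 * width.toNat - 1)).map
        (fun k => if ∃ p ∈ man, (0 ≤ p.1 ∧ p.1 < width ∧ 0 ≤ p.2 ∧ p.2 < height) ∧ 2 * p.1.toNat = k ∧ p.2.toNat = j then 'X' else ' ')
        = (List.range (2 * width.toNat - 1)).map
        (fun k => if k % 2 = 0 ∧ ∃ p ∈ man, (0 ≤ p.1 ∧ p.1 < width ∧ 0 ≤ p.2 ∧ p.2 < height) ∧ p.1.toNat = k / 2 ∧ p.2.toNat = j then 'X' else ' ') := by
      apply List.map_congr_left
      intro k _
      exact if_congr (pvHitC_iff man width height j k) rfl rfl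
    rw [hmapA, hmapB]
    exact pvRowStr width.toNat
      (fun i => ∃ p ∈ man, (0 ≤ p.1 ∧ p.1 < width ∧ 0 ≤ p.2 ∧ p.2 < height) ∧ p.1.toNat = i ∧ p.2.toNat = j)

-- ===== VERDICT (by name: the statement is the Claim_ definition above) =====
theorem to_grid_spec : Claim_equal_to_grid := by
  intro man _ _
  unfold Spec_to_grid to_grid to_grid_alt
  dsimp only
  rw [pvCellSet_eq_cell, pvPaint_eq_cell]
  exact congrArg (PySem.Str.join "\n")
    (pvMaps_eq man ((PySem.List.max? (man.map Prod.fst) (fun v => v)).getD 0 + 1)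
      ((PySem.List.max? (man.map Prod.snd) (fun v => v)).getD 0 + 1))
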